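/- GENERATED by mk_final_copies.py from the proof of the farm's unit `start_decoder.C8d` (farm:start_decoder.C8d.1: Proof.lean) as the
   re-elaboration sweep compiled it — do not edit. -/
import Asan.CheckWalk
import Vorbis.Spec.Units.start_decoder_C8d
import Vorbis.Spec.Worked.start_decoder_C8d_Lemmas

open X86 X86.User Asan Vorbis Vorbis.Spec Vorbis.Spec.StartDecoder

set_option maxRecDepth 100000
set_option maxHeartbeats 4000000

namespace Vorbis.Spec.start_decoder_C8d

/-- **Segment C8d of `start_decoder`, walked** (0x114a8c … 0x114ac4 → 0x114710; stb_vorbis_fixed.c 3859–3861: `++c->sorted_values`,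
`c->sorted_values[-1] = -1`, `compute_sorted_huffman(c, lengths, values)`, the `jmp` to the join). ONE walk to the call (two check
sites: the pointer field inside the codebooks block, the sentinel word at the base of the `sorted_values` block), the callee's
precondition from `ready_of_nest` + `Ready.pre`, a second walk over the `jmp`, and `Ready.through` for the exit `At8S`. -/
theorem c8d_walk (Lay : Layout) (hLay : Lay.hi = 0x1000000) (μ : Microarch) (hμ : UserX.MicroOK μ) (u₀ : State)
    (hcode : HasCodeNat Lay u₀ Vorbis.L.start_decoder.entry Vorbis.Code.code_start_decoder.nat Vorbis.L.start_decoder.size)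
    (h8 : Asan.SmallCheck Lay μ Vorbis.WayInv (Vorbis.CodeOK u₀) [.rax, .rcx, .rdx] 8 Vorbis.L.__asan_load8_noabort.entry)
    (h4 : Asan.SmallCheck Lay μ Vorbis.WayInv (Vorbis.CodeOK u₀) [.rax, .rcx, .rdx] 4 Vorbis.L.__asan_store4_noabort.entry)
    (hsh : ∀ (others : List Obj) (frames : List (Nat × FrameLayout)) (Blk : Block → Prop), Calls Lay μ Vorbis.WayInv (Vorbis.conv u₀) Vorbis.L.compute_sorted_huffman.entry (Vorbis.Spec.compute_sorted_huffman.spec others frames Blk))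
    (g : Ghost) (i : Nat) (v : State) (hat : At8M3 u₀ g i v) :
    ReachVia Lay μ WayInv v (fun w => At8S u₀ g i w) := by
  obtain ⟨A, lengths, values, A2, A3, Ai, Aw, Ab, Ac, hin, hbc, hca, hsc, hsv, hzf⟩ := hat
  obtain ⟨hfr, hco, hval, hse⟩ := hin
  have he := hfr.entry
  v_entry he
  have w_rip := hfr.rip
  obtain ⟨hRA, hR8⟩ := hfr.r_eq
  have hRAe : g.RA = (g.e.reg .rsp).toNat := rfl
  simp only [steady, depth] at hRA he_room he_stack
  have c_rsp : v.reg .rsp = g.e.reg .rsp - 1480 := by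
    rw [hfr.rsp]
    symm
    apply eq_addr
    u_omega
  have hpos : Pos g A := Pos.of hfr hco.cur
  have hm0 : MInv g i A2 A3 Ai A v.mem := MInv.of hfr hco.cur
  have ha : ArenaOK A.1 A.2 v.mem g.f := hco.cur.sd.arena
  have hcwh := hm0.c_where
  have htx := hco.cur.hand.arenaText
  simp only [Vorbis.L.textHi] at htx
  have hbin := arena_inside ha hsv.1
  have hbo := ha.block_off hsv.1
  simp only at hbin hbo
  obtain ⟨hlen64, hval64⟩ := core_bounds hco
  obtain ⟨cw, hcw⟩ : ∃ cw : Word, cw = addr (g.cb v.mem i) := ⟨_, rfl⟩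
  have hcwn : cw.toNat = g.cb v.mem i := by
    rw [hcw]
    exact toNat_addr _ (by omega)
  have c_r14 : v.reg .r14 = cw := by
    rw [hcw]
    exact hco.cur.r14
  -- the load of `c->sorted_values` (0x114a98), named before the walk
  have r_sv : v.mem.readLE (cw + 2104) 8 = Codebook.sorted_values v.mem (g.cb v.mem i) := by
    have e1 : cw + 2104 = addr (g.cb v.mem i + 2104) := by
      rw [hcw, addr_add_lit]
    rw [e1]
    rfl
  obtain ⟨b, hb⟩ : ∃ b : Nat, b = Codebook.sorted_values v.mem (g.cb v.mem i) := ⟨_, rfl⟩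
  rw [← hb] at r_sv hbin hbo
  have hbn : (UInt64.ofNat b).toNat = b := by
    rw [UInt64.toNat_ofNat']
    omega
  have c_rbx := hco.rbx
  have c_r12 := hco.r12
  have w_eq : Mem.EqOn Vorbis.L.textLo Vorbis.L.textHi u₀.mem v.mem := hfr.code
  have hdf : v.flags .df = false := (show abiInv _ from hfr.inv).1
  have hmx : v.mxcsr &&& 0x1F80 = 0x1F80 := (show abiInv _ from hfr.inv).2
  have hsse := Vorbis.sseOK_of_abiInv hfr.inv
  have w_kept : RegsKept [.rsp] v v := RegsKept.refl _ _
  have hsh' := hsh A.2 g.frames' (C7.blkT A)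
  u_walk hcode [hμ.vendor] until [Vorbis.L.start_decoder.at_114710] span [Vorbis.L.textLo, Vorbis.L.textHi] side (v_side)
  case check_114a93 =>
    -- 0x114a93: the check of `c->sorted_values` (load8 c + 838H): inside the codebooks block
    have hun : ShadowUntouched v.mem s_114a93.mem := by v_untouched
    apply Vorbis.Spec.check_site hfr.shadow hun (C7.cb_site hco.cur 2104 8 (by omega) (by omega))
    u_omega
  case check_114aaa =>
    -- 0x114aaa: the check of `sorted_values[-1]` (store4 at the block's base)
    have hun : ShadowUntouched v.mem s_114aaa.mem := by v_untouched
    have hL : BlkLive A.1.Blk (Live (stackObjs g.frames' ++ A.2)) :=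
      ha.blkLive (fun o ho => List.mem_append_right _ ho)
    have hs : Site (Live (stackObjs g.frames' ++ A.2)) b 4 := by
      apply Site.of_blk hL hsv.1
      · simp only
        omega
      · simp only
        omega
      · omega
    apply Vorbis.Spec.check_site hfr.shadow hun hs
    u_omega
  case call_inv =>
    v_inv
  case pre_114abf =>
    show SortedHuffmanPre A.2 g.frames' (C7.blkT A) s_114abf
    subst hb
    obtain ⟨hrd, ecb, hunA⟩ := ready_of_nest hco hm0 hpos hval hse hbc hca hsc hsv hzf _ cw _ _ _ (by u_omega) hcw w_mem
      (w_kept .r14 (by decide)) (w_kept .rbx (by decide)) (w_kept .r12 (by decide))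
    apply hrd.pre
    · refine ⟨?_, hfr.offText⟩
      have e : (s_114abf.reg .rsp).toNat + 8 = g.R := by
        rw [w_rsp]
        u_omega
      rw [e]
      exact hfr.shadow.untouched hunA
    · rw [w_rdi, ecb]
      exact hcwn
    · rw [w_rsi]
      exact toNat_addr _ hlen64
    · rw [w_rdx]
      exact toNat_addr _ hval64
  case cont =>
    -- 0x114ac4: compute_sorted_huffman returned; the `jmp` to the join, then everything through the callee's footprint
    have w_eq := Vorbis.conv_code_eqOn w_code
    have w_df := (show X86.User.abiInv _ from w_inv).1
    have w_mx := (show X86.User.abiInv _ from w_inv).2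
    have w_sse := Vorbis.sseOK_of_abiInv w_inv
    simp only [X86.User.Spec.footprint, vspec] at w_same
    have k_same := w_same
    obtain ⟨k_un, k_zv⟩ := w_post
    u_walk hcode [hμ.vendor] until [Vorbis.L.start_decoder.at_114710] span [Vorbis.L.textLo, Vorbis.L.textHi] side (v_side)
    -- 0x114710: the join. `Ready` at the callee's entry, then everything through its footprint
    rw [← w_mem] at k_same k_un k_zv
    subst hb
    obtain ⟨hrd, ecb, hunA⟩ := ready_of_nest hco hm0 hpos hval hse hbc hca hsc hsv hzf _ cw _ _ _ (by u_omega) hcw w_mem_114abf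
      (w_kept_114abf .r14 (by decide)) (w_kept_114abf .rbx (by decide)) (w_kept_114abf .r12 (by decide))
    have hrdi : (s_114abf.reg .rdi).toNat = g.cb s_114abf.mem i := by
      rw [w_rdi_114abf, ecb]
      exact hcwn
    have hrsp1 : (s_114abf.reg .rsp).toNat = g.R - 8 := by
      rw [w_rsp_114abf]
      u_omega
    obtain ⟨hco2, hm2, hk4, hk4c⟩ := hrd.through hpos hrdi hrsp1 k_same k_un k_zv
      ((w_kept .r14 (by decide)).trans (w_kept_114abf .r14 (by decide)).symm)
      ((w_kept .rbx (by decide)).trans (w_kept_114abf .rbx (by decide)).symm)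
      ((w_kept .r12 (by decide)).trans (w_kept_114abf .r12 (by decide)).symm)
    have hrsp' : s_114ac4.reg .rsp = addr g.R := by
      rw [w_rsp]
      apply eq_addr
      u_omega
    have hinv' : abiInv s_114ac4 := by v_inv
    have hfr2 : Frame u₀ g Vorbis.L.start_decoder.at_114710 A s_114ac4 :=
      hm2.frame hfr w_rip hrsp' w_eq hinv' hfr.offText hfr.ext
    exact ReachVia.done ⟨A, lengths, values, A2, A3, Ai, Aw, Ab, hfr2, hco2, hk4, hk4c⟩

end Vorbis.Spec.start_decoder_C8d

/-- The unit `start_decoder.C8d`: the walked segment under the statement's hypotheses. -/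
theorem Vorbis.Spec.Worked.start_decoder_C8d_ok : Vorbis.Spec.start_decoder_C8d.Statement := by
  intro Lay hLay μ hμ u₀ hcode h8 h4 hsh
  exact Vorbis.Spec.start_decoder_C8d.c8d_walk Lay hLay μ hμ u₀ hcode h8 h4 hsh
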